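-- pv_equiv track=rewrite | github.com/ThimiH/Competitive_Coding | Hackerrank/Dynamic Programming/PlayWithWords.py | playWithWords
-- ===== SOURCE A (Python) =====
-- def playWithWords(s):
--     length = len(s)
--     firsts = []
--     seconds = []
--     lens = []
--     ans = 1
--     for first in range(length):
--         for second in range(first+1,length):
--             if s[first:second+1] == s[first:second+1][::-1]:
--                 firsts.append(first)
--                 seconds.append(second)
--                 lens.append(second-first+1)
--
--     ind1, ind2 =0,0
--     while ind2<len(lens):
--         while firsts[ind1]<=seconds[ind2]:
--             ind1 += 1
--             if ind1 == len(firsts):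
--                 break
--         try :
--             ans = max(ans, max(lens[:ind2+1])*max(lens[ind1:]))
--         except:
--             break
--         ind2+=1
--     return ans
-- ===== SOURCE B (Python) =====
-- def playWithWords(s):
--     n = len(s)
--     # all (start, end) pairs of palindromic substrings of length >= 2, start ascending
--     entries = [(i, j) for i in range(n) for j in range(i + 1, n)
--                if s[i:j + 1] == s[i:j + 1][::-1]]
--     N = len(entries)
--     lens = [j - i + 1 for (i, j) in entries]
--     # suffix maxima of lens, built back to front
--     suf = []
--     m = 0
--     for v in reversed(lens):
--         m = max(m, v)
--         suf.append(m)
--     suf.reverse()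
--     ans = 1
--     pm = 0   # running max of lens[:ind2+1]
--     S = -1   # running max of seen end positions
--     j = 0    # monotone pointer: first index with entries[j][0] > S
--     for ind2 in range(N):
--         pm = max(pm, lens[ind2])
--         S = max(S, entries[ind2][1])
--         while j < N and entries[j][0] <= S:
--             j += 1
--         if j == N:
--             break
--         ans = max(ans, pm * suf[j])
--     return ans
-- ===== Notes on version B (the rewrite author's own statement) =====
-- stated objective: faster
-- what changed: A's second phase recomputes max(lens[:ind2+1]) and max(lens[ind1:]) by scanning slices at every step (quadratic in the number of palindromic substrings, i.e. O(n^4)); B precomputes one suffix-max array and keeps running prefix maxima of lengths and end positions with a single monotone pointer, so the second phase is linear and the whole runs in O(n^3) dominated by the palindrome enumeration.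
import Mathlib
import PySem

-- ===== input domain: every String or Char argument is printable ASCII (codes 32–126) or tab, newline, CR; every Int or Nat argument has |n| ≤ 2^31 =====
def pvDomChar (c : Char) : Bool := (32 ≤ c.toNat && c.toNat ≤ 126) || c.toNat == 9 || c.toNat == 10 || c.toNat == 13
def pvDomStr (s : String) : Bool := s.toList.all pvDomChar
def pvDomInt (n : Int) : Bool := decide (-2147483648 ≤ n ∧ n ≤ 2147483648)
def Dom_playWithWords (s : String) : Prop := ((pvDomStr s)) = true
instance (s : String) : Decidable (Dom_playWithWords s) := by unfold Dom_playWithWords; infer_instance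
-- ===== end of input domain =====

-- B replaces A's second phase (max over a growing prefix slice and a shrinking suffix slice,
-- both recomputed at every step) by one precomputed suffix-max array plus running prefix
-- maxima with a monotone pointer; objective: faster.

-- ===== PORT A =====

-- max(l) for a list guaranteed nonempty at every call site (Python max of a nonempty list)
def pyMaxNE (l : List Int) : Int :=
  match l with
  | [] => 0
  | x :: t => t.foldl max x

-- the inner 'while firsts[ind1] <= seconds[ind2]: ind1 += 1; if ind1 == len(firsts): break'
def advA (F : List Int) (b : Int) (i : Nat) : Nat :=
  if h : i < F.length then
    if F[i] ≤ b then advA F b (i + 1) else i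
  else i
termination_by F.length - i
decreasing_by omega

-- the outer 'while ind2 < len(lens)' loop; fuel = len(lens) - ind2; the 'except: break'
-- fires exactly when lens[ind1:] is empty
def loopA (F Sc L : List Int) : Nat → Nat → Nat → Int → Int
  | 0, _, _, ans => ans
  | fuel + 1, ind2, ind1, ans =>
    let i1 := advA F (Sc.getD ind2 0) ind1
    if (L.drop i1).isEmpty then ans
    else loopA F Sc L fuel (ind2 + 1) i1
          (max ans (pyMaxNE (L.take (ind2 + 1)) * pyMaxNE (L.drop i1)))

def playWithWords (s : String) : Int :=
  let cs := s.toList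
  let length : Int := cs.length
  let t := (PySem.List.pyRange 0 length).foldl (fun acc first =>
      (PySem.List.pyRange (first + 1) length).foldl (fun acc second =>
          let sub := PySem.List.slice cs (some first) (some (second + 1))
          if sub = sub.reverse then
            (acc.1 ++ [first], acc.2.1 ++ [second], acc.2.2 ++ [second - first + 1])
          else acc) acc)
      (([], [], []) : List Int × List Int × List Int)
  loopA t.1 t.2.1 t.2.2 t.2.2.length 0 0 1

-- ===== PORT B =====

-- entries = [(i, j) for i in range(n) for j in range(i+1, n) if s[i:j+1] == s[i:j+1][::-1]]
def entriesB (cs : List Char) (n : Int) : List (Int × Int) :=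
  (PySem.List.pyRange 0 n).flatMap (fun i =>
    ((PySem.List.pyRange (i + 1) n).filter (fun j =>
        let sub := PySem.List.slice cs (some i) (some (j + 1))
        sub = sub.reverse)).map (fun j => (i, j)))

-- suffix maxima of lens, built back to front then reversed
def sufB (L : List Int) : List Int :=
  ((L.reverse.foldl (fun (acc : Int × List Int) v =>
      let m := max acc.1 v; (m, acc.2 ++ [m])) (0, ([] : List Int))).2).reverse

-- 'while j < N and entries[j][0] <= S: j += 1'
def advB (E : List (Int × Int)) (S : Int) (j : Nat) : Nat :=
  if h : j < E.length then
    if (E[j]).1 ≤ S then advB E S (j + 1) else j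
  else j
termination_by E.length - j
decreasing_by omega

-- 'for ind2 in range(N): …  if j == N: break'; fuel = N - ind2
def loopB (E : List (Int × Int)) (L suf : List Int) : Nat → Nat → Int → Int → Nat → Int → Int
  | 0, _, _, _, _, ans => ans
  | fuel + 1, ind2, pm, S, j, ans =>
    let pm' := max pm (L.getD ind2 0)
    let S' := max S ((E.getD ind2 (0, 0)).2)
    let j' := advB E S' j
    if j' = E.length then ans
    else loopB E L suf fuel (ind2 + 1) pm' S' j' (max ans (pm' * suf.getD j' 0))

def playWithWords_alt (s : String) : Int :=
  let cs := s.toList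
  let n : Int := cs.length
  let E := entriesB cs n
  let L := E.map (fun p => p.2 - p.1 + 1)
  loopB E L (sufB L) E.length 0 0 (-1) 0 1

-- ===== PRECONDITION & SPEC =====
def Spec_playWithWords (s : String) (out : Int) : Prop := out = playWithWords_alt s
instance (s : String) (out : Int) : Decidable (Spec_playWithWords s out) := by unfold Spec_playWithWords; infer_instance

-- ===== CLAIM (what is proved, stated in full; the proofs are below) =====
def Claim_equal_playWithWords : Prop := ∀ (s : String), Dom_playWithWords s → Spec_playWithWords s (playWithWords s)

-- ===== LEMMAS AND PROOFS =====

-- A's three append-lists over one filtered pass are the three projections of one filtered pass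
theorem triFold (l : List Int) (p : Int → Prop) [DecidablePred p] (f g h : Int → Int)
    (acc : List Int × List Int × List Int) :
    l.foldl (fun acc j => if p j then (acc.1 ++ [f j], acc.2.1 ++ [g j], acc.2.2 ++ [h j]) else acc) acc
      = (acc.1 ++ (l.filter (fun j => decide (p j))).map f,
         acc.2.1 ++ (l.filter (fun j => decide (p j))).map g,
         acc.2.2 ++ (l.filter (fun j => decide (p j))).map h) := by
  induction l generalizing acc with
  | nil => simp
  | cons x t ih =>
    simp only [List.foldl_cons, List.filter_cons]
    by_cases hp : p x
    · simp [hp, ih]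
    · simp [hp, ih]

theorem triOuter (l : List Int) (u v w : Int → List Int)
    (acc : List Int × List Int × List Int) :
    l.foldl (fun acc i => (acc.1 ++ u i, acc.2.1 ++ v i, acc.2.2 ++ w i)) acc
      = (acc.1 ++ l.flatMap u, acc.2.1 ++ l.flatMap v, acc.2.2 ++ l.flatMap w) := by
  induction l generalizing acc with
  | nil => simp
  | cons x t ih => simp [ih]

theorem foldl_max_max (l : List Int) (a : Int) : ∀ b, l.foldl max (max a b) = max a (l.foldl max b) := by
  induction l with
  | nil => intro b; rfl
  | cons x t ih =>
    intro b
    simp only [List.foldl_cons, max_assoc]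
    exact ih (max b x)

theorem pyMaxNE_eq (l : List Int) (hne : l ≠ []) (hpos : ∀ x ∈ l, 0 ≤ x) :
    pyMaxNE l = l.foldl max 0 := by
  match l with
  | [] => exact absurd rfl hne
  | x :: t =>
    simp only [pyMaxNE, List.foldl_cons]
    rw [show max (0:Int) x = x from max_eq_right (hpos x (by simp))]

theorem suf_fold_fst (R : List Int) : ∀ (m : Int) (acc : List Int),
    (R.foldl (fun (acc : Int × List Int) v => (max acc.1 v, acc.2 ++ [max acc.1 v])) (m, acc)).1
      = R.foldl max m := by
  induction R with
  | nil => intro m acc; rfl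
  | cons x t ih => intro m acc; simp only [List.foldl_cons]; exact ih _ _

theorem foldl_max_cons (x : Int) (L : List Int) :
    (x :: L).foldl max 0 = max x (L.foldl max 0) := by
  simp only [List.foldl_cons]
  rw [show max (0:Int) x = max x 0 from max_comm _ _, foldl_max_max]

theorem foldl_max_reverse (L : List Int) : L.reverse.foldl max 0 = L.foldl max 0 := by
  induction L with
  | nil => rfl
  | cons x t ih =>
    simp only [List.reverse_cons, List.foldl_append, List.foldl_cons, List.foldl_nil, ih]
    rw [show max (0:Int) x = max x 0 from max_comm _ _, foldl_max_max]
    exact (max_comm _ _).symm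

theorem suf_cons (x : Int) (L : List Int) :
    sufB (x :: L) = (max (L.foldl max 0) x) :: sufB L := by
  unfold sufB
  simp only [List.reverse_cons, List.foldl_append, List.foldl_cons, List.foldl_nil,
    List.reverse_append, List.reverse_nil, List.nil_append, List.cons_append]
  rw [suf_fold_fst, foldl_max_reverse]

theorem sufB_getD (L : List Int) :
    ∀ j, j < L.length → (sufB L).getD j 0 = (L.drop j).foldl max 0 := by
  induction L with
  | nil => intro j hj; simp at hj
  | cons x t ih =>
    intro j hj
    rw [suf_cons]
    match j with
    | 0 =>
      simp only [List.getD_cons_zero, List.drop_zero]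
      rw [foldl_max_cons]; exact max_comm _ _
    | j + 1 =>
      simp only [List.getD_cons_succ, List.drop_succ_cons]
      exact ih j (by simpa using hj)

theorem advB_le (E : List (Int × Int)) (S : Int) (j : Nat) (h : j ≤ E.length) :
    advB E S j ≤ E.length := by
  unfold advB
  split
  · split
    · exact advB_le E S (j+1) (by omega)
    · exact h
  · exact h
termination_by E.length - j
decreasing_by omega

theorem advB_stop (E : List (Int × Int)) (S : Int) (j : Nat) :
    ∀ h : advB E S j < E.length, S < (E[advB E S j]'h).1 := by
  unfold advB
  split
  · rename_i hj
    split
    · exact advB_stop E S (j+1)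
    · rename_i hc
      intro h
      omega
  · intro h
    rename_i hj
    omega
termination_by E.length - j
decreasing_by omega

-- the two while-loops advance the shared pointer to the same place: every position at or
-- beyond the current pointer carries a first-index above S, so the bounds b and max S b agree
theorem adv_eq (E : List (Int × Int)) (hmono : E.Pairwise (fun p q => p.1 ≤ q.1))
    (S b : Int) : ∀ j, (∀ h : j < E.length, S < (E[j]'h).1) →
    advA (E.map Prod.fst) b j = advB E (max S b) j := by
  intro j
  induction hn : E.length - j generalizing j with
  | zero =>
    intro _
    unfold advA advB
    rw [dif_neg (by simp; omega), dif_neg (by omega)]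
  | succ n ih =>
    intro hS
    unfold advA advB
    have hj : j < E.length := by omega
    rw [dif_pos (by simpa using hj), dif_pos hj]
    have hgetF : (E.map Prod.fst)[j]'(by simpa using hj) = (E[j]'hj).1 := by simp
    rw [hgetF]
    have hSj := hS hj
    have hcond : ((E[j]'hj).1 ≤ b) ↔ ((E[j]'hj).1 ≤ max S b) := by omega
    by_cases hc : (E[j]'hj).1 ≤ b
    · rw [if_pos hc, if_pos (hcond.mp hc)]
      apply ih (j+1) (by omega)
      intro h1
      have hmono' := List.pairwise_iff_getElem.mp hmono j (j+1) hj h1 (by omega)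
      omega
    · rw [if_neg hc, if_neg (fun h => hc (hcond.mpr h))]

def palFilter (cs : List Char) (n i : Int) : List Int :=
  (PySem.List.pyRange (i + 1) n).filter (fun j =>
    decide (PySem.List.slice cs (some i) (some (j + 1))
      = (PySem.List.slice cs (some i) (some (j + 1))).reverse))

-- A's first phase builds exactly the three projections of B's entries list
theorem phase1_eq (cs : List Char) (n : Int) :
    (PySem.List.pyRange 0 n).foldl (fun acc first =>
      (PySem.List.pyRange (first + 1) n).foldl (fun acc second =>
          let sub := PySem.List.slice cs (some first) (some (second + 1))
          if sub = sub.reverse then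
            (acc.1 ++ [first], acc.2.1 ++ [second], acc.2.2 ++ [second - first + 1])
          else acc) acc)
      (([], [], []) : List Int × List Int × List Int)
      = ((entriesB cs n).map Prod.fst, (entriesB cs n).map Prod.snd,
         (entriesB cs n).map (fun p => p.2 - p.1 + 1)) := by
  have hE : entriesB cs n
      = (PySem.List.pyRange 0 n).flatMap (fun i => (palFilter cs n i).map (fun j => (i, j))) := rfl
  have hinner : ∀ (i : Int) (acc : List Int × List Int × List Int),
      (PySem.List.pyRange (i + 1) n).foldl (fun acc second =>
          let sub := PySem.List.slice cs (some i) (some (second + 1))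
          if sub = sub.reverse then
            (acc.1 ++ [i], acc.2.1 ++ [second], acc.2.2 ++ [second - i + 1])
          else acc) acc
        = (acc.1 ++ (palFilter cs n i).map (fun _ => i),
           acc.2.1 ++ (palFilter cs n i).map (fun j => j),
           acc.2.2 ++ (palFilter cs n i).map (fun j => j - i + 1)) := by
    intro i acc
    exact triFold (PySem.List.pyRange (i + 1) n)
      (fun j => PySem.List.slice cs (some i) (some (j + 1))
        = (PySem.List.slice cs (some i) (some (j + 1))).reverse)
      (fun _ => i) (fun j => j) (fun j => j - i + 1) acc
  have houter := PySem.List.foldl_congr_mem' (PySem.List.pyRange 0 n) _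
    (fun (acc : List Int × List Int × List Int) i =>
      (acc.1 ++ (palFilter cs n i).map (fun _ => i),
       acc.2.1 ++ (palFilter cs n i).map (fun j => j),
       acc.2.2 ++ (palFilter cs n i).map (fun j => j - i + 1)))
    (([], [], []) : List Int × List Int × List Int)
    (fun i _ acc => hinner i acc)
  rw [houter, triOuter, hE]
  simp [List.map_flatMap, List.map_map, Function.comp_def]

theorem entriesB_mem (cs : List Char) (n : Int) :
    ∀ p ∈ entriesB cs n, 0 ≤ p.1 ∧ p.1 + 1 ≤ p.2 := by
  intro p hp
  unfold entriesB at hp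
  rw [List.mem_flatMap] at hp
  obtain ⟨i, hi, hp⟩ := hp
  rw [List.mem_map] at hp
  obtain ⟨j, hj, rfl⟩ := hp
  rw [List.mem_filter] at hj
  have h1 := PySem.List.mem_pyRange_one.mp hi
  have h2 := PySem.List.mem_pyRange_one.mp hj.1
  exact ⟨h1.1, h2.1⟩

theorem entriesB_mono (cs : List Char) (m : Nat) :
    (entriesB cs (m : Int)).Pairwise (fun p q => p.1 ≤ q.1) := by
  unfold entriesB
  rw [List.pairwise_flatMap]
  constructor
  · intro i _
    rw [List.pairwise_map]
    exact List.pairwise_iff_getElem.mpr (fun _ _ _ _ _ => le_refl i)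
  · rw [PySem.List.pyRange_zero_natCast, List.pairwise_map]
    apply List.Pairwise.imp _ List.pairwise_lt_range
    intro k1 k2 hk x hx y hy
    rw [List.mem_map] at hx hy
    obtain ⟨j1, _, rfl⟩ := hx
    obtain ⟨j2, _, rfl⟩ := hy
    simp only
    exact_mod_cast le_of_lt hk

-- the two second phases agree, given the sortedness of entries' first components and the
-- bounds of every entry; invariants: pm and S are the prefix maxima A recomputes, and the
-- shared pointer sits strictly above S
theorem loop_main (E : List (Int × Int))
    (hmono : E.Pairwise (fun p q => p.1 ≤ q.1))
    (hmem : ∀ p ∈ E, 0 ≤ p.1 ∧ p.1 + 1 ≤ p.2) :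
    ∀ (fuel ind2 ind1 : Nat) (ans pm S : Int),
      fuel + ind2 = E.length →
      ind1 ≤ E.length →
      pm = ((E.map (fun p => p.2 - p.1 + 1)).take ind2).foldl max 0 →
      S = ((E.map Prod.snd).take ind2).foldl max (-1) →
      (∀ h : ind1 < E.length, S < (E[ind1]'h).1) →
      loopA (E.map Prod.fst) (E.map Prod.snd) (E.map (fun p => p.2 - p.1 + 1)) fuel ind2 ind1 ans
        = loopB E (E.map (fun p => p.2 - p.1 + 1)) (sufB (E.map (fun p => p.2 - p.1 + 1)))
            fuel ind2 pm S ind1 ans := by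
  intro fuel
  set L := E.map (fun p => p.2 - p.1 + 1) with hLdef
  set Sc := E.map Prod.snd with hScdef
  have hLpos : ∀ x ∈ L, 0 ≤ x := by
    intro x hx
    rw [hLdef, List.mem_map] at hx
    obtain ⟨p, hp, rfl⟩ := hx
    have := hmem p hp
    omega
  induction fuel with
  | zero => intro ind2 ind1 ans pm S _ _ _ _ _; rfl
  | succ fuel ih =>
    intro ind2 ind1 ans pm S hfuel hind1le hpm hS hind1
    have hind2 : ind2 < E.length := by omega
    have hlenL : L.length = E.length := by rw [hLdef]; simp
    have hlenSc : Sc.length = E.length := by rw [hScdef]; simp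
    have hb : Sc.getD ind2 0 = (E[ind2]'hind2).2 := by
      rw [List.getD_eq_getElem Sc 0 (by omega)]
      simp [hScdef]
    have hb' : (E.getD ind2 ((0:Int), (0:Int))).2 = (E[ind2]'hind2).2 := by
      rw [List.getD_eq_getElem E _ hind2]
    simp only [loopA, loopB, hb, hb']
    have hadv : advA (E.map Prod.fst) ((E[ind2]'hind2).2) ind1
        = advB E (max S ((E[ind2]'hind2).2)) ind1 := adv_eq E hmono S _ ind1 hind1
    rw [hadv]
    set S' := max S ((E[ind2]'hind2).2) with hS'def
    set j' := advB E S' ind1 with hj'def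
    have hj'le : j' ≤ E.length := advB_le E S' ind1 hind1le
    have hempty : ((L.drop j').isEmpty = true) = (j' = E.length) := by
      simp [List.isEmpty_iff, List.drop_eq_nil_iff, hlenL]
      omega
    simp only [hempty]
    by_cases hend : j' = E.length
    · rw [if_pos hend, if_pos hend]
    · rw [if_neg hend, if_neg hend]
      have hj'lt : j' < E.length := by omega
      have hj'L : j' < L.length := by omega
      have hi2L : ind2 < L.length := by omega
      have hgd : L.getD ind2 0 = L[ind2]'hi2L := List.getD_eq_getElem L 0 hi2L
      have htake : L.take (ind2 + 1) = L.take ind2 ++ [L[ind2]'hi2L] := by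
        rw [List.take_add_one]
        congr 1
        rw [List.getElem?_eq_getElem hi2L]
        rfl
      have hpm' : pyMaxNE (L.take (ind2 + 1)) = max pm (L.getD ind2 0) := by
        rw [pyMaxNE_eq _ (by
              intro hc
              rcases List.take_eq_nil_iff.mp hc with h | h
              · omega
              · rw [h] at hi2L; simp at hi2L) (fun x hx => hLpos x (List.mem_of_mem_take hx))]
        rw [htake, List.foldl_append, ← hpm, hgd]
        rfl
      have hsuf : pyMaxNE (L.drop j') = (sufB L).getD j' 0 := by
        rw [pyMaxNE_eq _ (by rw [ne_eq, List.drop_eq_nil_iff]; omega)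
              (fun x hx => hLpos x (List.mem_of_mem_drop hx))]
        rw [sufB_getD L j' hj'L]
      rw [hpm', hsuf]
      apply ih (ind2 + 1) j' _ _ _ (by omega) hj'le
      · rw [htake, List.foldl_append, ← hpm, hgd]
        rfl
      · have hi2Sc : ind2 < Sc.length := by omega
        have htakeSc : Sc.take (ind2 + 1) = Sc.take ind2 ++ [Sc[ind2]'hi2Sc] := by
          rw [List.take_add_one]
          congr 1
          rw [List.getElem?_eq_getElem hi2Sc]
          rfl
        rw [hS'def, hS, htakeSc, List.foldl_append]
        have : Sc[ind2]'hi2Sc = (E[ind2]'hind2).2 := by simp [hScdef]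
        rw [this]
        rfl
      · intro h
        exact advB_stop E S' ind1 h

-- ===== VERDICT (by name: the statement is the Claim_ definition above) =====
theorem playWithWords_spec : Claim_equal_playWithWords := by
  intro s _
  unfold Spec_playWithWords playWithWords playWithWords_alt
  simp only [phase1_eq, List.length_map]
  apply loop_main (entriesB s.toList (s.toList.length : Int))
    (entriesB_mono s.toList s.toList.length)
    (entriesB_mem s.toList (s.toList.length : Int))
    (entriesB s.toList (s.toList.length : Int)).length 0 0 1 0 (-1)
    (by omega) (by omega) rfl rfl
  intro h
  have := entriesB_mem s.toList (s.toList.length : Int) _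
    (List.getElem_mem h)
  omega
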